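-- pv_equiv track=rewrite | github.com/jrmanrique/codingproblems | dailyprogrammer/python/239_hard.py | reverse_threes
-- ===== SOURCE A (Python) =====
-- from copy import deepcopy
--
-- def reverse_threes(seq):
--     reverses = set()
--     stack = [[1, seq]]
--     while stack:
--         num, queue = stack.pop()
--         queue = deepcopy(queue)
--         if queue:
--             digit = queue.pop()
--         else:
--             reverses.add(num)
--             continue
--         for d in [digit * sign for sign in (-1, 1)]:
--             stack.append([num * 3 + d, queue])
--
--     return reverses
-- ===== SOURCE B (Python) =====
-- from copy import deepcopy
--
-- def reverse_threes(seq):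
--     reverses = set()
--
--     def rec(num, queue):
--         queue = deepcopy(queue)
--         if not queue:
--             reverses.add(num)
--             return
--         digit = queue.pop()
--         rec(num * 3 + digit, queue)
--         rec(num * 3 - digit, queue)
--
--     rec(1, seq)
--     return reverses
-- ===== Notes on version B (the rewrite author's own statement) =====
-- stated objective: alternative
-- what changed: Replaces A's explicit worklist (stack of [num, remaining-queue] pairs managed by a while loop) with direct branching recursion over the sequence that accumulates into a closure set.
import Mathlib
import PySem

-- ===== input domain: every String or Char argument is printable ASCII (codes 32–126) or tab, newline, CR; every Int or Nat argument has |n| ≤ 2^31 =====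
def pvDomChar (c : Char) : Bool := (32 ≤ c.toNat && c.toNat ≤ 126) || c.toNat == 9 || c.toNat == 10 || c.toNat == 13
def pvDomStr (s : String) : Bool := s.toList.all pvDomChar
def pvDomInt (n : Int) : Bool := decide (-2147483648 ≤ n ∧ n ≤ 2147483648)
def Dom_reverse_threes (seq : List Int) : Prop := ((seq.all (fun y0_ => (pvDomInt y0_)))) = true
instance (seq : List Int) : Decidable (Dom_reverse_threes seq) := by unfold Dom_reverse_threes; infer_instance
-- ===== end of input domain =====

-- B replaces A's explicit stack-driven while loop with direct branching recursion
-- over the sequence (alternative decomposition; same exponential cost).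

-- ===== PORT A =====
-- A's while loop over the explicit stack; stack head = Python stack top (push = cons).
-- The stack measure ∑ 3^(queue length) decreases at every iteration.
def pvLoopA : List (Int × List Int) → PySem.Set Int → PySem.Set Int
  | [], reverses => reverses
  | (num, queue) :: stack, reverses =>
    match h : PySem.List.pop? queue (-1) with
    | none => pvLoopA stack (PySem.Set.add reverses num)
    | some (digit, rest) =>
        -- Python pushes num*3-digit then num*3+digit, so +digit ends on top
        pvLoopA ((num * 3 + digit, rest) :: (num * 3 - digit, rest) :: stack) reverses
  termination_by st _ => ((st.map (fun p => 3 ^ p.2.length)).sum : Nat)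
  decreasing_by
    · simp
    · have hl : rest.length + 1 = queue.length := by
        simpa using PySem.List.length_of_pop?_eq_some queue h
      have h3 : 3 ^ rest.length + 3 ^ rest.length < 3 ^ queue.length := by
        have hp : 0 < 3 ^ rest.length := by positivity
        rw [← hl, pow_succ]; omega
      simp only [List.map_cons, List.sum_cons]
      omega

def reverse_threes (seq : List Int) : List Int :=
  pvLoopA [(1, seq)] PySem.Set.empty

-- ===== PORT B =====
-- B's recursive helper: deepcopy is identity on immutable Int lists; the closure
-- set is threaded as an accumulator (first call rec(num*3+digit), then rec(num*3-digit)).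
def pvRecB (num : Int) (queue : List Int) (reverses : PySem.Set Int) : PySem.Set Int :=
  match h : PySem.List.pop? queue (-1) with
  | none => PySem.Set.add reverses num
  | some (digit, rest) =>
      pvRecB (num * 3 - digit) rest (pvRecB (num * 3 + digit) rest reverses)
  termination_by queue.length
  decreasing_by
    all_goals
      have hl : rest.length + 1 = queue.length := by
        simpa using PySem.List.length_of_pop?_eq_some queue h
      omega

def reverse_threes_alt (seq : List Int) : List Int :=
  pvRecB 1 seq PySem.Set.empty

-- ===== PRECONDITION & SPEC =====
def Spec_reverse_threes (seq : List Int) (out : List Int) : Prop := out = reverse_threes_alt seq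
instance (seq : List Int) (out : List Int) : Decidable (Spec_reverse_threes seq out) := by unfold Spec_reverse_threes; infer_instance

-- ===== CLAIM (what is proved, stated in full; the proofs are below) =====
def Claim_equal_reverse_threes : Prop := ∀ (seq : List Int), Dom_reverse_threes seq → Spec_reverse_threes seq (reverse_threes seq)

-- ===== LEMMAS AND PROOFS =====

-- A's stack loop folds B's recursion over the stack entries (DFS orders coincide:
-- the +digit branch is handled first by both).
theorem pvLoopA_eq_foldl (st : List (Int × List Int)) (acc : PySem.Set Int) :
    pvLoopA st acc = st.foldl (fun a p => pvRecB p.1 p.2 a) acc := by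
  induction st, acc using pvLoopA.induct with
  | case1 acc => simp [pvLoopA]
  | case2 num queue stack acc h ih =>
      rw [pvLoopA, h]
      rw [ih]
      simp only [List.foldl_cons]
      rw [pvRecB, h]
  | case3 num queue stack acc digit rest h ih =>
      rw [pvLoopA, h]
      dsimp only
      rw [ih]
      simp only [List.foldl_cons]
      congr 1
      conv_rhs => rw [pvRecB, h]

-- ===== VERDICT (by name: the statement is the Claim_ definition above) =====
theorem reverse_threes_spec : Claim_equal_reverse_threes := by
  intro seq _
  unfold Spec_reverse_threes reverse_threes reverse_threes_alt
  rw [pvLoopA_eq_foldl]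
  simp
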